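-- pv_equiv track=rewrite | github.com/Marten-Ka/EvoInt-Tracker-v.2 | evoint-scripts/Downloader.py | authors_string_to_array
-- ===== SOURCE A (Python) =====
-- def clean_text(string):
--     string = string.replace('\n', ' ').replace('\t', ' ').replace('  ', ' ').replace('&nbsp;', '').replace('&nbsp', '').replace(u'\ufffd', '').replace(u'\xa0', '').replace(u'\xe2', '').replace(u'\x80', '').replace(u'\x94', '').strip()
--
--     # replace multiple whitespaces
--     while '  ' in string:
--         string = string.replace('  ', ' ')
--
--     while ',,' in string:
--         string = string.replace(',,', ',')
--
--     while ';;' in string: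
--         string = string.replace(';;', ';')
--
--     while string[-1] == ';':
--         string = string[0:-1]
--
--     return string
--
-- def authors_string_to_array(authors):
--     authors = clean_text(authors)
--
--     #
--     # We can't just replace the word 'and' with a comma,
--     # because then names like 'Alexander' would be
--     # changed to 'Alex,er'. We need to check if the
--     # and is inside a name.
--     #
--
--     words = authors.split(' ')
--     new_words = []
--
--     for i in range(len(words)):
--
--         if(words[i] == 'and' or words[i] == ',and' or words[i] == 'and,'):
--             continue
--
--         if((i + 1) < len(words) and words[i + 1].lower() == 'and'):
--             word = words[i] + ',' if(words[i][-1] != ',') else words[i]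
--             new_words.append(word)
--         else:
--             new_words.append(words[i])
--
--     return new_words
-- ===== SOURCE B (Python) =====
-- # B: replaces clean_text's three stabilising while-replace loops with one single-pass
-- # run-collapser per character and the trailing-';' loop with an rstrip, and walks the
-- # word list once in reverse with a "next word is 'and'" flag instead of index lookahead.
--
-- def _collapse(s, ch):
--     # collapse every run of ch to a single ch, in one left-to-right pass
--     out = []
--     for c in s:
--         if c == ch and out and out[-1] == ch:
--             continue
--         out.append(c)
--     return ''.join(out)
--
-- def _clean(string):
--     string = string.replace('\n', ' ').replace('\t', ' ').replace('  ', ' ').replace('&nbsp;', '').replace('&nbsp', '').replace(u'\ufffd', '').replace(u'\xa0', '').replace(u'\xe2', '').replace(u'\x80', '').replace(u'\x94', '').strip()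
--     string = _collapse(string, ' ')
--     string = _collapse(string, ',')
--     string = _collapse(string, ';')
--     return string.rstrip(';')
--
-- def authors_string_to_array(authors):
--     words = _clean(authors).split(' ')
--     out = []
--     next_is_and = False
--     for w in reversed(words):
--         if w not in ('and', ',and', 'and,'):
--             if next_is_and and not w.endswith(','):
--                 out.append(w + ',')
--             else:
--                 out.append(w)
--         next_is_and = (w.lower() == 'and')
--     out.reverse()
--     return out
-- ===== Notes on version B (the rewrite author's own statement) =====
-- stated objective: alternative
-- what changed: The three stabilising while-replace loops that collapse runs of ' ', ',' and ';' are replaced by one-pass run-collapsing scans, the trailing-';' while loop by rstrip(';'), and the indexed lookahead word loop by a single reversed scan carrying a 'next word is and' flag.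
import Mathlib
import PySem

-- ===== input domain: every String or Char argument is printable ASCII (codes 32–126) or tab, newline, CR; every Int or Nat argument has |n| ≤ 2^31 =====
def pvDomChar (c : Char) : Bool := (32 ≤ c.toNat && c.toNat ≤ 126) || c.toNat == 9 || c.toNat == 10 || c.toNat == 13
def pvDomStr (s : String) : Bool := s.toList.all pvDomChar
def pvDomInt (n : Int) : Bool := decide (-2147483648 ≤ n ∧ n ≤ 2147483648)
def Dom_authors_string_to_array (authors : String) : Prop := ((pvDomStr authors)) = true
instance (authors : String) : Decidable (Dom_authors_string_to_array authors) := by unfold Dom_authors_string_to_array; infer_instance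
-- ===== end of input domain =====

-- B replaces A's stabilising while-replace loops by one-pass run-collapsing, the trailing-';'
-- loop by an rstrip, and the indexed lookahead word loop by a reversed scan with a flag
-- (objective: alternative — structurally different, no speed claim).

-- the fixed replace chain + strip, the identical first line of both Pythons' cleaners
-- (helper shared by both ports and by Pre_)
def pvChainStrip (s : List Char) : List Char :=
  let s := PySem.Chars.replace s ['\n'] [' ']
  let s := PySem.Chars.replace s ['\t'] [' ']
  let s := PySem.Chars.replace s [' ',' '] [' ']
  let s := PySem.Chars.replace s ['&','n','b','s','p',';'] []
  let s := PySem.Chars.replace s ['&','n','b','s','p'] []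
  let s := PySem.Chars.replace s ['\uFFFD'] []
  let s := PySem.Chars.replace s ['\u00A0'] []
  let s := PySem.Chars.replace s ['\u00E2'] []
  let s := PySem.Chars.replace s ['\u0080'] []
  let s := PySem.Chars.replace s ['\u0094'] []
  PySem.Chars.strip s

-- ===== PORT A =====
-- pvRep2 is the structural form of one Python pass of s.replace(cc, c); it and the lemmas
-- up to pvDropLast_lt are cited by the two while-loop ports' termination proofs.
def pvRep2 (c : Char) : List Char → List Char
  | a :: b :: t => if a = c ∧ b = c then c :: pvRep2 c t else a :: pvRep2 c (b :: t)
  | l => l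

theorem pvGo_spec (c : Char) : ∀ (fuel : Nat) (l acc : List Char), l.length ≤ fuel →
    PySem.Chars.replace.go [c,c] [c] fuel l acc = acc.reverse ++ pvRep2 c l := by
  intro fuel
  induction fuel with
  | zero =>
    intro l acc h
    have : l = [] := by cases l <;> simp_all
    subst this; simp [PySem.Chars.replace.go, pvRep2]
  | succ n ih =>
    intro l acc h
    match l with
    | [] => simp [PySem.Chars.replace.go, pvRep2]
    | [a] =>
      rw [PySem.Chars.replace.go]
      have : [c,c].isPrefixOf [a] = false := by simp [List.isPrefixOf]
      rw [this]
      simp only [Bool.false_eq_true, if_false]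
      rw [ih [] (a :: acc) (by simp)]
      simp [pvRep2]
    | a :: b :: t =>
      rw [PySem.Chars.replace.go]
      by_cases hab : a = c ∧ b = c
      · obtain ⟨ha, hb⟩ := hab
        have hp : [c,c].isPrefixOf (a :: b :: t) = true := by
          simp [List.isPrefixOf, ha, hb]
        rw [hp]
        simp only [if_true]
        simp only [List.length_cons, List.drop_succ_cons, List.drop_zero, List.length_nil,
          List.reverse_cons, List.reverse_nil, List.nil_append, List.drop]
        rw [show ([c] ++ acc : List Char) = c :: acc from rfl, ih t (c :: acc) (by simp at h ⊢; omega)]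
        rw [pvRep2]
        simp [ha, hb]
      · have : [c,c].isPrefixOf (a :: b :: t) = false := by
          simp [List.isPrefixOf]; intro h1 h2; exact hab ⟨h1.symm, h2.symm⟩
        rw [this]
        simp only [Bool.false_eq_true, if_false]
        rw [ih (b :: t) (a :: acc) (by simp at h ⊢; omega)]
        rw [pvRep2]
        simp [hab]

theorem pvReplace_eq (c : Char) (s : List Char) :
    PySem.Chars.replace s [c,c] [c] = pvRep2 c s := by
  rw [PySem.Chars.replace]
  simp only [List.isEmpty_cons, Bool.false_eq_true, if_false]
  exact pvGo_spec c s.length s [] (le_refl _)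

def pvHasCC (c : Char) : List Char → Bool
  | a :: b :: t => (decide (a = c) && decide (b = c)) || pvHasCC c (b :: t)
  | _ => false

theorem pvHasCC_iff (c : Char) : ∀ s : List Char, pvHasCC c s = true ↔ [c,c] <:+: s := by
  intro s
  induction s with
  | nil => simp [pvHasCC]
  | cons a t ih =>
    match t with
    | [] =>
      simp only [pvHasCC, Bool.false_eq_true, false_iff]
      intro h; have := h.length_le; simp at this
    | b :: u =>
      rw [pvHasCC, List.infix_cons_iff, ← ih]
      constructor
      · rintro h
        rcases Bool.or_eq_true_iff.mp h with h | h
        · left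
          simp at h
          rw [h.1, h.2]
          exact List.cons_prefix_cons.mpr ⟨rfl, List.cons_prefix_cons.mpr ⟨rfl, List.nil_prefix⟩⟩
        · right; exact h
      · rintro (h | h)
        · rcases List.cons_prefix_cons.mp h with ⟨rfl, h2⟩
          rcases List.cons_prefix_cons.mp h2 with ⟨rfl, _⟩
          simp
        · simp [h]

theorem pvRep2_len_le_aux (c : Char) : ∀ (n : Nat) (s : List Char), s.length ≤ n →
    (pvRep2 c s).length ≤ s.length := by
  intro n
  induction n with
  | zero => intro s h; have : s = [] := by cases s <;> simp_all
            subst this; simp [pvRep2]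
  | succ n ih =>
    intro s h
    match s with
    | [] => simp [pvRep2]
    | [a] => simp [pvRep2]
    | a :: b :: t =>
      rw [pvRep2]
      by_cases hab : a = c ∧ b = c
      · rw [if_pos hab]
        have h2 := ih t (by simp only [List.length_cons] at h; omega)
        simp only [List.length_cons]
        omega
      · rw [if_neg hab]
        have := ih (b :: t) (by simp only [List.length_cons] at h ⊢; omega)
        simp only [List.length_cons] at this ⊢
        omega

theorem pvRep2_len_le (c : Char) (s : List Char) : (pvRep2 c s).length ≤ s.length :=
  pvRep2_len_le_aux c s.length s (le_refl _)

theorem pvRep2_len_lt_aux (c : Char) : ∀ (n : Nat) (s : List Char), s.length ≤ n →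
    pvHasCC c s = true → (pvRep2 c s).length < s.length := by
  intro n
  induction n with
  | zero => intro s h hcc
            have : s = [] := by cases s <;> simp_all
            subst this; simp [pvHasCC] at hcc
  | succ n ih =>
    intro s h hcc
    match s with
    | [] => simp [pvHasCC] at hcc
    | [a] => simp [pvHasCC] at hcc
    | a :: b :: t =>
      rw [pvRep2]
      by_cases hab : a = c ∧ b = c
      · rw [if_pos hab]
        have := pvRep2_len_le c t
        simp only [List.length_cons]; omega
      · rw [if_neg hab]
        rw [pvHasCC] at hcc
        have hcc' : pvHasCC c (b :: t) = true := by
          rcases Bool.or_eq_true_iff.mp hcc with h1 | h1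
          · exfalso; simp at h1; exact hab h1
          · exact h1
        have := ih (b :: t) (by simp only [List.length_cons] at h ⊢; omega) hcc'
        simp only [List.length_cons] at this ⊢; omega

theorem pvIsIn_replace_len_lt (c : Char) (s : List Char)
    (h : PySem.Chars.isIn [c,c] s = true) :
    (PySem.Chars.replace s [c,c] [c]).length < s.length := by
  rw [pvReplace_eq]
  exact pvRep2_len_lt_aux c s.length s (le_refl _)
    ((pvHasCC_iff c s).mpr ((PySem.Chars.isIn_iff_infix [c,c] s).mp h))

theorem pvDropLast_lt (s : List Char) (ch : Char) (h : PySem.List.pyGet? s (-1) = some ch) :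
    (PySem.List.slice s (some 0) (some (-1))).length < s.length := by
  have hne : s ≠ [] := by rintro rfl; simp [PySem.List.pyGet?, PySem.List.pyIdx?] at h
  have : PySem.List.slice s (some 0) (some (-1)) = s.dropLast := by
    simp [PySem.List.slice_zero_start, PySem.List.slice_to_neg_one]
  rw [this, List.length_dropLast]
  have : 0 < s.length := List.length_pos_iff.mpr hne
  omega

-- port of A's 'while cc in string: string = string.replace(cc, c)' (one such loop per char)
def pvCollapseWhile (c : Char) (s : List Char) : List Char :=
  if h : PySem.Chars.isIn [c,c] s = true then
    pvCollapseWhile c (PySem.Chars.replace s [c,c] [c])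
  else s
termination_by s.length
decreasing_by exact pvIsIn_replace_len_lt c s h

-- port of A's 'while string[-1] == \';\': string = string[0:-1]' (none = IndexError on '')
def pvTrimSemis? (s : List Char) : Option (List Char) :=
  match h : PySem.List.pyGet? s (-1) with
  | none => none
  | some ch =>
    if ch = ';' then pvTrimSemis? (PySem.List.slice s (some 0) (some (-1))) else some s
termination_by s.length
decreasing_by exact pvDropLast_lt s ch h

def pvCleanTextA? (s : List Char) : Option (List Char) :=
  pvTrimSemis? (pvCollapseWhile ';' (pvCollapseWhile ',' (pvCollapseWhile ' ' (pvChainStrip s))))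

-- the body of A's 'for i in range(len(words))' loop
def pvBodyA (ws : List (List Char)) (acc : List String) (i : Int) : List String :=
  let w := PySem.List.pyGetD ws i []
  if w = ['a','n','d'] ∨ w = [',','a','n','d'] ∨ w = ['a','n','d',','] then acc
  else if (i + 1) < (ws.length : Int) ∧ PySem.Chars.lower (PySem.List.pyGetD ws (i + 1) []) = ['a','n','d'] then
    acc ++ [String.ofList (if PySem.List.pyGet? w (-1) ≠ some ',' then w ++ [','] else w)]
  else acc ++ [String.ofList w]

def authors_string_to_array (authors : String) : List String :=
  match pvCleanTextA? authors.toList with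
  | none => []       -- Python raises IndexError here; excluded by Pre_
  | some cleaned =>
    let words := PySem.Chars.splitOn cleaned [' ']
    (PySem.List.pyRange 0 (words.length : Int) 1).foldl (pvBodyA words) []

-- ===== PORT B =====
-- one pass of B's _collapse(s, ch): append each char unless it repeats a just-emitted ch
def pvCollapseB (ch : Char) (s : List Char) : List Char :=
  s.foldl (fun out c =>
    if c = ch ∧ out ≠ [] ∧ PySem.List.pyGet? out (-1) = some ch then out else out ++ [c]) []

-- s.rstrip(';') ported by hand (exact: drops exactly the trailing run of ';')
def pvRstripSemi (s : List Char) : List Char :=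
  (s.reverse.dropWhile (fun c => c = ';')).reverse

def pvCleanB (s : List Char) : List Char :=
  pvRstripSemi (pvCollapseB ';' (pvCollapseB ',' (pvCollapseB ' ' (pvChainStrip s))))

-- one step of B's reversed scan: state = (output so far, does the next word lower to 'and')
def pvStepB (st : List String × Bool) (w : List Char) : List String × Bool :=
  (if ¬(w = ['a','n','d'] ∨ w = [',','a','n','d'] ∨ w = ['a','n','d',',']) then
     (if st.2 = true ∧ ¬(PySem.Chars.endswith w [','] = true) then st.1 ++ [String.ofList (w ++ [','])]
      else st.1 ++ [String.ofList w])
   else st.1,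
   decide (PySem.Chars.lower w = ['a','n','d']))

def authors_string_to_array_alt (authors : String) : List String :=
  let words := PySem.Chars.splitOn (pvCleanB authors.toList) [' ']
  ((words.reverse.foldl pvStepB ([], false)).1).reverse

-- ===== PRECONDITION & SPEC =====
-- Pre_ excludes exactly the inputs on which A raises IndexError: those whose cleaned string
-- (fixed replace chain + strip) consists only of ';' (possibly empty) — A's trailing-';'
-- while loop then empties the string and indexes string[-1] on ''.
def Pre_authors_string_to_array (authors : String) : Prop :=
  ((pvChainStrip authors.toList).any (fun c => c ≠ ';')) = true
instance (authors : String) : Decidable (Pre_authors_string_to_array authors) := by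
  unfold Pre_authors_string_to_array; infer_instance

def pvWitness_authors_string_to_array : String := "Alice and Bob"

def Spec_authors_string_to_array (authors : String) (out : List String) : Prop :=
  out = authors_string_to_array_alt authors
instance (authors : String) (out : List String) : Decidable (Spec_authors_string_to_array authors out) := by
  unfold Spec_authors_string_to_array; infer_instance

-- ===== CLAIM (what is proved, stated in full; the proofs are below) =====
def Claim_equal_authors_string_to_array : Prop :=
  ∀ (authors : String), Dom_authors_string_to_array authors →
    Pre_authors_string_to_array authors →
      Spec_authors_string_to_array authors (authors_string_to_array authors)

-- ===== LEMMAS AND PROOFS =====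

def pvSq (c : Char) : Bool → List Char → List Char
  | _, [] => []
  | b, x :: t => if x = c ∧ b = true then pvSq c b t else x :: pvSq c (decide (x = c)) t

theorem pvSq_true_eq (c : Char) : ∀ t : List Char,
    pvSq c true t = pvSq c false (t.dropWhile (fun x => x = c)) := by
  intro t
  induction t with
  | nil => simp [pvSq]
  | cons x t ih =>
    by_cases hx : x = c
    · rw [pvSq, if_pos ⟨hx, rfl⟩, List.dropWhile_cons_of_pos (by simp [hx])]
      exact ih
    · rw [pvSq, if_neg (by simp [hx]), List.dropWhile_cons_of_neg (by simp [hx])]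
      rw [pvSq, if_neg (by simp)]

theorem pvRep2_cons_of_ne (c a : Char) (u : List Char) (h : ¬ a = c) :
    pvRep2 c (a :: u) = a :: pvRep2 c u := by
  match u with
  | [] => simp [pvRep2]
  | b :: v => rw [pvRep2, if_neg (by tauto)]

theorem pvHasCC_cons_false (c a b : Char) (t : List Char)
    (h : pvHasCC c (a :: b :: t) = false) :
    ¬(a = c ∧ b = c) ∧ pvHasCC c (b :: t) = false := by
  rw [pvHasCC] at h
  simp only [Bool.or_eq_false_iff, Bool.and_eq_false_iff] at h
  constructor
  · intro ⟨h1, h2⟩; rcases h.1 with h3 | h3 <;> simp [h1, h2] at h3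
  · exact h.2

theorem pvSq_eq_self (c : Char) : ∀ s : List Char, pvHasCC c s = false → pvSq c false s = s := by
  intro s
  induction s with
  | nil => simp [pvSq]
  | cons a t ih =>
    intro h
    rw [pvSq, if_neg (by simp)]
    by_cases ha : a = c
    · match t with
      | [] => simp [pvSq]
      | b :: u =>
        obtain ⟨h1, h2⟩ := pvHasCC_cons_false c a b u h
        have hb : ¬ b = c := fun hb => h1 ⟨ha, hb⟩
        rw [ha]
        simp only [decide_true]
        rw [pvSq_true_eq, List.dropWhile_cons_of_neg (by simp [hb]), ih h2]
    · have ht : pvHasCC c t = false := by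
        match t with
        | [] => simp [pvHasCC]
        | b :: u => exact (pvHasCC_cons_false c a b u h).2
      simp only [decide_eq_false ha]
      rw [ih ht]

theorem pvSq_false_cons_ne (c x : Char) (u : List Char) (hx : ¬ x = c) :
    pvSq c false (x :: u) = x :: pvSq c false u := by
  rw [pvSq, if_neg (by simp)]
  simp [decide_eq_false hx]

theorem pvSq_false_cons_self (c : Char) (u : List Char) :
    pvSq c false (c :: u) = c :: pvSq c false (u.dropWhile (fun x => x = c)) := by
  rw [pvSq, if_neg (by simp)]
  simp only [decide_true]
  rw [pvSq_true_eq]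

theorem pvSq_rep2 (c : Char) : ∀ (n : Nat) (s : List Char), s.length ≤ n →
    pvSq c false (pvRep2 c s) = pvSq c false s ∧
    pvSq c false ((pvRep2 c s).dropWhile (fun x => x = c)) =
      pvSq c false (s.dropWhile (fun x => x = c)) := by
  intro n
  induction n with
  | zero =>
    intro s h
    have : s = [] := by cases s <;> simp_all
    subst this; simp [pvRep2]
  | succ n ih =>
    intro s h
    match s with
    | [] => simp [pvRep2]
    | [a] => simp [pvRep2]
    | a :: b :: t =>
      have hlt : t.length ≤ n := by simp only [List.length_cons] at h; omega
      have hlbt : (b :: t).length ≤ n := by simp only [List.length_cons] at h ⊢; omega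
      by_cases hab : a = c ∧ b = c
      · obtain ⟨ha, hb⟩ := hab
        rw [pvRep2, if_pos ⟨ha, hb⟩]
        have hR : pvSq c false (a :: b :: t) =
            c :: pvSq c false (t.dropWhile (fun x => x = c)) := by
          rw [ha, pvSq_false_cons_self, hb, List.dropWhile_cons_of_pos (by simp)]
        have hL : pvSq c false (c :: pvRep2 c t) =
            c :: pvSq c false ((pvRep2 c t).dropWhile (fun x => x = c)) :=
          pvSq_false_cons_self c _
        constructor
        · rw [hL, hR, (ih t hlt).2]
        · rw [List.dropWhile_cons_of_pos (by simp), ha, List.dropWhile_cons_of_pos (by simp),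
              hb, List.dropWhile_cons_of_pos (by simp), (ih t hlt).2]
      · rw [pvRep2, if_neg hab]
        by_cases ha : a = c
        · have hb : ¬ b = c := fun hb => hab ⟨ha, hb⟩
          have hr : pvRep2 c (b :: t) = b :: pvRep2 c t := pvRep2_cons_of_ne c b t hb
          have hL : pvSq c false (a :: pvRep2 c (b :: t)) =
              c :: b :: pvSq c false (pvRep2 c t) := by
            rw [ha, hr, pvSq_false_cons_self, List.dropWhile_cons_of_neg (by simp [hb]),
                pvSq_false_cons_ne c b _ hb]
          have hR : pvSq c false (a :: b :: t) = c :: b :: pvSq c false t := by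
            rw [ha, pvSq_false_cons_self, List.dropWhile_cons_of_neg (by simp [hb]),
                pvSq_false_cons_ne c b _ hb]
          constructor
          · rw [hL, hR, (ih t hlt).1]
          · have hL3 : List.dropWhile (fun x => decide (x = c)) (a :: pvRep2 c (b :: t)) =
                b :: pvRep2 c t := by
              rw [ha, hr, List.dropWhile_cons_of_pos (by simp),
                  List.dropWhile_cons_of_neg (by simp [hb])]
            have hR3 : List.dropWhile (fun x => decide (x = c)) (a :: b :: t) = b :: t := by
              rw [ha, List.dropWhile_cons_of_pos (by simp),
                  List.dropWhile_cons_of_neg (by simp [hb])]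
            rw [hL3, hR3, pvSq_false_cons_ne c b _ hb, pvSq_false_cons_ne c b _ hb, (ih t hlt).1]
        · have hL : pvSq c false (a :: pvRep2 c (b :: t)) =
              a :: pvSq c false (pvRep2 c (b :: t)) := pvSq_false_cons_ne c a _ ha
          have hR : pvSq c false (a :: b :: t) = a :: pvSq c false (b :: t) :=
            pvSq_false_cons_ne c a _ ha
          constructor
          · rw [hL, hR, (ih (b :: t) hlbt).1]
          · rw [List.dropWhile_cons_of_neg (by simp [ha]), List.dropWhile_cons_of_neg (by simp [ha]),
                hL, hR, (ih (b :: t) hlbt).1]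

theorem pvCollapseWhile_eq_sq (c : Char) : ∀ (n : Nat) (s : List Char), s.length ≤ n →
    pvCollapseWhile c s = pvSq c false s := by
  intro n
  induction n with
  | zero =>
    intro s h
    have : s = [] := by cases s <;> simp_all
    subst this
    rw [pvCollapseWhile, dif_neg]
    · simp [pvSq]
    · rw [PySem.Chars.isIn_iff_infix]
      intro hin
      simpa using hin.length_le
  | succ n ih =>
    intro s h
    rw [pvCollapseWhile]
    by_cases hin : PySem.Chars.isIn [c,c] s = true
    · rw [dif_pos hin, pvReplace_eq]
      have hcc : pvHasCC c s = true :=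
        (pvHasCC_iff c s).mpr ((PySem.Chars.isIn_iff_infix [c,c] s).mp hin)
      have hlt := pvRep2_len_lt_aux c s.length s (le_refl _) hcc
      rw [ih (pvRep2 c s) (by omega)]
      exact (pvSq_rep2 c s.length s (le_refl _)).1
    · rw [dif_neg hin]
      have hcc : pvHasCC c s = false := by
        rcases Bool.eq_false_or_eq_true (pvHasCC c s) with h1 | h1
        · exact absurd ((PySem.Chars.isIn_iff_infix [c,c] s).mpr ((pvHasCC_iff c s).mp h1)) hin
        · exact h1
      exact (pvSq_eq_self c s hcc).symm

theorem pvPyGet_neg_one_getLast? (α : Type) (xs : List α) :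
    PySem.List.pyGet? xs (-1) = xs.getLast? := by
  rw [List.getLast?_eq_getElem?]
  match xs with
  | [] => simp [PySem.List.pyGet?, PySem.List.pyIdx?]
  | x :: t => simp [PySem.List.pyGet?, PySem.List.pyIdx?, Nat.succ_le_succ]

theorem pvFoldB (c : Char) : ∀ (s acc : List Char),
    s.foldl (fun out x =>
      if x = c ∧ out ≠ [] ∧ PySem.List.pyGet? out (-1) = some c then out else out ++ [x]) acc =
    acc ++ pvSq c (decide (acc.getLast? = some c)) s := by
  intro s
  induction s with
  | nil => intro acc; simp [pvSq]
  | cons x t ih =>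
    intro acc
    rw [List.foldl_cons, ih]
    by_cases hc : x = c ∧ acc.getLast? = some c
    · have hne : acc ≠ [] := by
        intro h; rw [h] at hc; simp at hc
      rw [if_pos ⟨hc.1, hne, by rw [pvPyGet_neg_one_getLast? Char acc]; exact hc.2⟩]
      rw [pvSq, if_pos (by simp [hc.1, hc.2])]
    · rw [if_neg (by
        rintro ⟨h1, h2, h3⟩
        rw [pvPyGet_neg_one_getLast? Char acc] at h3
        exact hc ⟨h1, h3⟩)]
      conv_rhs => rw [pvSq]
      rw [if_neg (by
        rintro ⟨h1, h2⟩
        simp only [decide_eq_true_eq] at h2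
        exact hc ⟨h1, h2⟩)]
      rw [List.getLast?_concat]
      simp

theorem pvCollapseB_eq_sq (c : Char) (s : List Char) : pvCollapseB c s = pvSq c false s := by
  rw [pvCollapseB, pvFoldB]
  simp

theorem pvMem_sq_of_ne (c x : Char) (hx : ¬ x = c) : ∀ (s : List Char) (b : Bool),
    x ∈ s → x ∈ pvSq c b s := by
  intro s
  induction s with
  | nil => intro b h; simp at h
  | cons a t ih =>
    intro b h
    rw [pvSq]
    by_cases hc : a = c ∧ b = true
    · rw [if_pos hc]
      rcases List.mem_cons.mp h with h1 | h1
      · exact absurd (h1 ▸ hc.1) hx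
      · exact ih b h1
    · rw [if_neg hc]
      rcases List.mem_cons.mp h with h1 | h1
      · exact h1 ▸ List.mem_cons_self
      · exact List.mem_cons_of_mem a (ih _ h1)

theorem pvMem_sq_self (c : Char) : ∀ s : List Char, c ∈ s → c ∈ pvSq c false s := by
  intro s
  induction s with
  | nil => intro h; simp at h
  | cons a t ih =>
    intro h
    by_cases ha : a = c
    · rw [ha, pvSq_false_cons_self]; exact List.mem_cons_self
    · rw [pvSq_false_cons_ne c a t ha]
      rcases List.mem_cons.mp h with h1 | h1
      · exact absurd h1.symm ha
      · exact List.mem_cons_of_mem a (ih h1)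

theorem pvSlice_dropLast (s : List Char) :
    PySem.List.slice s (some 0) (some (-1)) = s.dropLast := by
  simp [PySem.List.slice_zero_start, PySem.List.slice_to_neg_one]

theorem pvTrim_eq : ∀ (n : Nat) (s : List Char), s.length ≤ n → (∃ x ∈ s, x ≠ ';') →
    pvTrimSemis? s = some (pvRstripSemi s) := by
  intro n
  induction n with
  | zero =>
    intro s hl h
    have : s = [] := by cases s <;> simp_all
    subst this; simp at h
  | succ n ih =>
    intro s hl h
    obtain ⟨x, hxs, hx⟩ := h
    have hne : s ≠ [] := by rintro rfl; simp at hxs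
    obtain ⟨u, a, rfl⟩ : ∃ u a, s = u ++ [a] := by
      rcases List.eq_nil_or_concat s with h1 | ⟨u, a, h1⟩
      · exact absurd h1 hne
      · exact ⟨u, a, by simpa using h1⟩
    rw [pvTrimSemis?]
    have hg : PySem.List.pyGet? (u ++ [a]) (-1) = some a :=
      PySem.List.pyGet?_neg_one_append_singleton u a
    split
    next heq => rw [hg] at heq; exact absurd heq (by simp)
    next ch heq =>
    rw [hg] at heq
    injection heq with heq
    subst heq
    by_cases hsemi : a = ';'
    · rw [if_pos hsemi, pvSlice_dropLast, List.dropLast_concat]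
      have hxu : x ∈ u := by
        rcases List.mem_append.mp hxs with h1 | h1
        · exact h1
        · simp at h1; exact absurd (h1 ▸ hsemi) hx
      rw [ih u (by simp at hl; omega) ⟨x, hxu, hx⟩]
      unfold pvRstripSemi
      rw [List.reverse_append, List.reverse_singleton, List.singleton_append,
          List.dropWhile_cons_of_pos (by simp [hsemi])]
    · rw [if_neg hsemi]
      unfold pvRstripSemi
      rw [List.reverse_append, List.reverse_singleton, List.singleton_append,
          List.dropWhile_cons_of_neg (by simp [hsemi])]
      simp

-- the common meaning of both word loops
def pvFlagOf (ws : List (List Char)) : Bool :=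
  match ws with
  | [] => false
  | w :: _ => decide (PySem.Chars.lower w = ['a','n','d'])

def pvFA : List (List Char) → List String
  | [] => []
  | w :: t =>
    (if w = ['a','n','d'] ∨ w = [',','a','n','d'] ∨ w = ['a','n','d',','] then []
     else [String.ofList (if pvFlagOf t = true then
             (if PySem.List.pyGet? w (-1) ≠ some ',' then w ++ [','] else w) else w)]) ++ pvFA t

theorem pvBodyA_shift (w : List Char) (t : List (List Char)) (a : List String) (k : Nat) :
    pvBodyA (w :: t) a ((k : Int) + 1) = pvBodyA t a (k : Int) := by
  have h1 : ((k : Int) + 1) = ((k + 1 : Nat) : Int) := by push_cast; ring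
  have h2 : ((k : Int) + 1 + 1) = ((k + 2 : Nat) : Int) := by push_cast; ring
  simp only [pvBodyA, h1, h2, PySem.List.pyGetD_natCast, List.getD_cons_succ, List.length_cons]
  have h3 : (((k + 1 : Nat) : Int) + 1) = ((k + 2 : Nat) : Int) := by push_cast; ring
  rw [h3]
  have h4 : (((k + 2 : Nat) : Int) < ((t.length + 1 : Nat) : Int)) ↔
      (((k + 1 : Nat) : Int) < (t.length : Int)) := by push_cast; omega
  simp only [h4, PySem.List.pyGetD_natCast, List.getD_cons_succ]

theorem pvBodyA_head (w : List Char) (t : List (List Char)) (acc : List String) :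
    pvBodyA (w :: t) acc 0 =
    acc ++ (if w = ['a','n','d'] ∨ w = [',','a','n','d'] ∨ w = ['a','n','d',','] then []
     else [String.ofList (if pvFlagOf t = true then
             (if PySem.List.pyGet? w (-1) ≠ some ',' then w ++ [','] else w) else w)]) := by
  rw [pvBodyA]
  simp only [PySem.List.pyGetD_zero_cons]
  by_cases hskip : w = ['a','n','d'] ∨ w = [',','a','n','d'] ∨ w = ['a','n','d',',']
  · rw [if_pos hskip, if_pos hskip]; simp
  · rw [if_neg hskip, if_neg hskip]
    match t with
    | [] =>
      rw [if_neg (by simp)]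
      simp [pvFlagOf]
    | w' :: u =>
      have hget : PySem.List.pyGetD (w :: w' :: u) ((0 : Int) + 1) [] = w' := by
        have h0 : ((0 : Int) + 1) = ((1 : Nat) : Int) := by norm_num
        rw [h0, PySem.List.pyGetD_natCast]
        rfl
      rw [hget]
      have hc : ((0 : Int) + 1 < ((w :: w' :: u).length : Int)) := by simp
      by_cases hl : PySem.Chars.lower w' = ['a','n','d']
      · rw [if_pos ⟨hc, hl⟩]
        simp [pvFlagOf, hl]
      · rw [if_neg (by rintro ⟨_, h⟩; exact hl h)]
        simp [pvFlagOf, hl]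

theorem pvLoopA' (ws : List (List Char)) : ∀ (acc : List String),
    (List.range ws.length).foldl (fun (a : List String) (k : Nat) => pvBodyA ws a (k : Int)) acc =
      acc ++ pvFA ws := by
  induction ws with
  | nil => intro acc; simp [pvFA]
  | cons w t ih =>
    intro acc
    rw [List.length_cons, List.range_succ_eq_map, List.foldl_cons, List.foldl_map]
    have hstep : (fun (a : List String) (k : Nat) => pvBodyA (w :: t) a ((k.succ : Nat) : Int)) =
        (fun (a : List String) (k : Nat) => pvBodyA t a (k : Int)) := by
      funext a k
      have h1 : ((k.succ : Nat) : Int) = (k : Int) + 1 := by push_cast; ring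
      rw [h1, pvBodyA_shift]
    rw [hstep]
    simp only [Nat.cast_zero]
    rw [ih (pvBodyA (w :: t) acc 0), pvBodyA_head, pvFA, List.append_assoc]

theorem pvLoopA (ws : List (List Char)) :
    (PySem.List.pyRange 0 (ws.length : Int) 1).foldl (pvBodyA ws) [] = pvFA ws := by
  rw [PySem.List.pyRange_one, List.foldl_map]
  have h1 : ((ws.length : Int) - 0).toNat = ws.length := by simp
  rw [h1]
  have h2 : (fun (a : List String) (k : Nat) => pvBodyA ws a (0 + (k : Int))) =
      (fun (a : List String) (k : Nat) => pvBodyA ws a (k : Int)) := by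
    funext a k; rw [zero_add]
  rw [h2, pvLoopA' ws []]
  simp

theorem pvEnds (w : List Char) :
    (PySem.Chars.endswith w [','] = true) ↔ PySem.List.pyGet? w (-1) = some ',' := by
  rw [PySem.Chars.endswith_iff w [','], pvPyGet_neg_one_getLast? Char w, List.getLast?_eq_some_iff]
  constructor
  · rintro ⟨u, hu⟩; exact ⟨u, hu.symm⟩
  · rintro ⟨u, hu⟩; exact ⟨u, hu.symm⟩

theorem pvLoopB : ∀ ws : List (List Char),
    ws.reverse.foldl pvStepB ([], false) = ((pvFA ws).reverse, pvFlagOf ws) := by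
  intro ws
  induction ws with
  | nil => simp [pvFA, pvFlagOf]
  | cons w t ih =>
    rw [List.reverse_cons, List.foldl_append, ih, List.foldl_cons, List.foldl_nil]
    by_cases hskip : w = ['a','n','d'] ∨ w = [',','a','n','d'] ∨ w = ['a','n','d',',']
    · simp [pvStepB, pvFA, hskip, pvFlagOf]
    · by_cases hflag : pvFlagOf t = true
      · by_cases hend : PySem.Chars.endswith w [','] = true
        · have hpy : PySem.List.pyGet? w (-1) = some ',' := (pvEnds w).mp hend
          simp [pvStepB, pvFA, hskip, hflag, hend, hpy, pvFlagOf.eq_def]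
        · have hpy : ¬ PySem.List.pyGet? w (-1) = some ',' := fun h => hend ((pvEnds w).mpr h)
          simp [pvStepB, pvFA, hskip, hflag, hend, hpy, pvFlagOf.eq_def]
      · simp [pvStepB, pvFA, hskip, hflag, pvFlagOf.eq_def]


theorem pvPreserve (c : Char) (s : List Char) (h : ∃ x ∈ s, x ≠ ';') :
    ∃ x ∈ pvSq c false s, x ≠ ';' := by
  obtain ⟨x, hxs, hx⟩ := h
  by_cases hxc : x = c
  · exact ⟨c, pvMem_sq_self c s (hxc ▸ hxs), hxc ▸ hx⟩
  · exact ⟨x, pvMem_sq_of_ne c x hxc s false hxs, hx⟩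

-- ===== VERDICT (by name: the statement is the Claim_ definition above) =====
theorem authors_string_to_array_spec : Claim_equal_authors_string_to_array := by
  intro authors _ hpre
  unfold Spec_authors_string_to_array
  unfold Pre_authors_string_to_array at hpre
  have hpre' : ∃ c ∈ pvChainStrip authors.toList, c ≠ ';' := by simpa using hpre
  unfold authors_string_to_array authors_string_to_array_alt pvCleanTextA? pvCleanB
  rw [pvCollapseWhile_eq_sq ' ' _ _ (le_refl _),
      pvCollapseWhile_eq_sq ',' _ _ (le_refl _),
      pvCollapseWhile_eq_sq ';' _ _ (le_refl _),
      pvCollapseB_eq_sq, pvCollapseB_eq_sq, pvCollapseB_eq_sq]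
  have hkeep : ∃ x ∈ pvSq ';' false (pvSq ',' false (pvSq ' ' false (pvChainStrip authors.toList))), x ≠ ';' :=
    pvPreserve ';' _ (pvPreserve ',' _ (pvPreserve ' ' _ hpre'))
  rw [pvTrim_eq _ _ (le_refl _) hkeep]
  simp only []
  rw [pvLoopA, pvLoopB]
  simp
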